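-- pv_equiv track=rewrite | github.com/Koeunseooooo/Algorithm | 삼성/swea/d3/1일차flatten.py | solve
-- ===== SOURCE A (Python) =====
-- def solve(n, arr):
--     while n:
--         # 현재 시점기준으로 가장 큰 값과 작은 값
--         min_value = max(arr)
--         max_value = min(arr)
--         min_idx = arr.index(min_value)
--         max_idx = arr.index(max_value)
--         arr[min_idx] += 1
--         arr[max_idx] -= 1
--         n -= 1
--     min_value = max(arr)
--     max_value = min(arr)
--     diff = max_value - min_value
--     return diff
-- ===== SOURCE B (Python) =====
-- def solve(n, arr):
--     m, M = min(arr), max(arr)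
--     if m == M:
--         return 0
--     return m - M - 2 * n
-- ===== Notes on version B (the rewrite author's own statement) =====
-- stated objective: faster
-- what changed: A simulates n rounds, each scanning the list four times (max, min, two index lookups) and mutating it; B observes that each round simply raises the current maximum by 1 and lowers the current minimum by 1, so the answer is min(arr)-max(arr)-2n in closed form (0 when all elements are equal), computed in one pass with no simulation.
import Mathlib
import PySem

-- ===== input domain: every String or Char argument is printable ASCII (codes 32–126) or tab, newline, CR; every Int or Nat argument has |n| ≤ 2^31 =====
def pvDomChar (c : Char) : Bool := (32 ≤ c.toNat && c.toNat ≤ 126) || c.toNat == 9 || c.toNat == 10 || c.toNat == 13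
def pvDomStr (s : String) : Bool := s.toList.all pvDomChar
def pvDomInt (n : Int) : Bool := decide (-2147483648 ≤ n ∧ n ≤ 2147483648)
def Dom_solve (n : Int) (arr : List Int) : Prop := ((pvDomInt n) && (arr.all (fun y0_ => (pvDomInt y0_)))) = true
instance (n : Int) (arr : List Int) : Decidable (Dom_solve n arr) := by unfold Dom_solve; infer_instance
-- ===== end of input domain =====

-- B replaces A's n-round simulation by the closed form min(arr) - max(arr) - 2*n (0 when all
-- elements are equal); note A mutates its arr argument in place while B does not — the
-- equivalence proved here is about the return value only.

-- ===== PORT A =====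
-- one iteration of A's while-loop body (min_value/max_value names kept from the Python,
-- which swaps them: min_value holds max(arr))
def solveStep (arr : List Int) : List Int :=
  let min_value := (PySem.List.max? arr (fun x => x)).getD 0
  let max_value := (PySem.List.min? arr (fun x => x)).getD 0
  let min_idx := (PySem.List.index? arr min_value).getD 0
  let max_idx := (PySem.List.index? arr max_value).getD 0
  let arr := arr.set min_idx ((arr[min_idx]?.getD 0) + 1)
  let arr := arr.set max_idx ((arr[max_idx]?.getD 0) - 1)
  arr

-- the while-loop, run n times (under Pre_, n ≥ 0; Python diverges for n < 0)
def solveLoop : Nat → List Int → List Int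
  | 0, arr => arr
  | k + 1, arr => solveLoop k (solveStep arr)

def solve (n : Int) (arr : List Int) : Int :=
  let arr := solveLoop n.toNat arr
  let min_value := (PySem.List.max? arr (fun x => x)).getD 0
  let max_value := (PySem.List.min? arr (fun x => x)).getD 0
  max_value - min_value

-- ===== PORT B =====
def solve_alt (n : Int) (arr : List Int) : Int :=
  let m := (PySem.List.min? arr (fun x => x)).getD 0
  let M := (PySem.List.max? arr (fun x => x)).getD 0
  if m == M then 0 else m - M - 2 * n

-- ===== PRECONDITION & SPEC =====
-- Pre_ excludes exactly the inputs where A does not return: arr = [] (max([]) raises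
-- ValueError) and n < 0 (the while-loop never terminates).
def Pre_solve (n : Int) (arr : List Int) : Prop := 0 ≤ n ∧ arr ≠ []
instance (n : Int) (arr : List Int) : Decidable (Pre_solve n arr) := by unfold Pre_solve; infer_instance
def pvWitness_solve : Int × List Int := (3, [1, 5, 2])

def Spec_solve (n : Int) (arr : List Int) (out : Int) : Prop := out = solve_alt n arr
instance (n : Int) (arr : List Int) (out : Int) : Decidable (Spec_solve n arr out) := by unfold Spec_solve; infer_instance

-- ===== CLAIM (what is proved, stated in full; the proofs are below) =====
def Claim_equal_solve : Prop := ∀ (n : Int) (arr : List Int), Dom_solve n arr → Pre_solve n arr → Spec_solve n arr (solve n arr)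

-- ===== LEMMAS AND PROOFS =====
theorem solveStep_const (arr : List Int) (m : Int)
    (hmin : PySem.List.min? arr (fun x => x) = some m)
    (hmax : PySem.List.max? arr (fun x => x) = some m) :
    solveStep arr = arr := by
  obtain ⟨i, hi⟩ := Option.isSome_iff_exists.mp
    ((PySem.List.index?_isSome_iff arr m).mpr (PySem.List.min?_mem hmin))
  obtain ⟨hilt, hig, -⟩ := PySem.List.getElem_of_index?_eq_some hi
  unfold solveStep
  simp only [hmin, hmax, hi, Option.getD_some]
  rw [List.getElem?_eq_getElem hilt, hig]
  simp only [Option.getD_some, List.getElem?_set_self', List.getElem?_eq_getElem hilt, hig,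
    List.set_set]
  norm_num
  rw [← hig, List.set_getElem_self]

theorem max?_eq_some_of (arr : List Int) (M : Int) (hmem : M ∈ arr)
    (hub : ∀ y ∈ arr, y ≤ M) : PySem.List.max? arr (fun x => x) = some M := by
  cases h : PySem.List.max? arr (fun x => x) with
  | none => rw [PySem.List.max?_eq_none_iff] at h; simp [h] at hmem
  | some x =>
      exact congrArg some (le_antisymm (hub x (PySem.List.max?_mem h))
        (PySem.List.max?_isMax h M hmem))

theorem min?_eq_some_of (arr : List Int) (m : Int) (hmem : m ∈ arr)
    (hlb : ∀ y ∈ arr, m ≤ y) : PySem.List.min? arr (fun x => x) = some m := by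
  cases h : PySem.List.min? arr (fun x => x) with
  | none => rw [PySem.List.min?_eq_none_iff] at h; simp [h] at hmem
  | some x =>
      exact congrArg some (le_antisymm (PySem.List.min?_isMin h m hmem)
        (hlb x (PySem.List.min?_mem h)))

theorem solveStep_spread (arr : List Int) (m M : Int)
    (hmin : PySem.List.min? arr (fun x => x) = some m)
    (hmax : PySem.List.max? arr (fun x => x) = some M)
    (hlt : m < M) :
    PySem.List.min? (solveStep arr) (fun x => x) = some (m - 1) ∧
    PySem.List.max? (solveStep arr) (fun x => x) = some (M + 1) := by
  obtain ⟨i, hi⟩ := Option.isSome_iff_exists.mp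
    ((PySem.List.index?_isSome_iff arr M).mpr (PySem.List.max?_mem hmax))
  obtain ⟨j, hj⟩ := Option.isSome_iff_exists.mp
    ((PySem.List.index?_isSome_iff arr m).mpr (PySem.List.min?_mem hmin))
  obtain ⟨hilt, hig, -⟩ := PySem.List.getElem_of_index?_eq_some hi
  obtain ⟨hjlt, hjg, -⟩ := PySem.List.getElem_of_index?_eq_some hj
  have hij : i ≠ j := fun h => absurd (hig.symm.trans (h ▸ hjg)) (ne_of_gt hlt)
  have hstep : solveStep arr = (arr.set i (M + 1)).set j (m - 1) := by
    unfold solveStep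
    simp only [hmin, hmax, hi, hj, Option.getD_some]
    rw [List.getElem?_eq_getElem hilt, hig, List.getElem?_set_ne hij,
      List.getElem?_eq_getElem hjlt, hjg]
    simp only [Option.getD_some]
  have hjlt2 : j < ((arr.set i (M + 1)).set j (m - 1)).length := by
    simpa using hjlt
  have hilt2 : i < ((arr.set i (M + 1)).set j (m - 1)).length := by
    simpa using hilt
  have hmmem : (m - 1) ∈ solveStep arr := by
    rw [hstep]
    have h := List.getElem_mem hjlt2
    rwa [List.getElem_set_self] at h
  have hMmem : (M + 1) ∈ solveStep arr := by
    rw [hstep]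
    have h := List.getElem_mem hilt2
    rwa [List.getElem_set_ne (fun h => hij h.symm), List.getElem_set_self] at h
  have hrange : ∀ y ∈ solveStep arr, m - 1 ≤ y ∧ y ≤ M + 1 := by
    intro y hy
    rw [hstep] at hy
    rcases List.mem_or_eq_of_mem_set hy with hy1 | rfl
    · rcases List.mem_or_eq_of_mem_set hy1 with hy2 | rfl
      · exact ⟨le_trans (by omega) (PySem.List.min?_isMin hmin y hy2),
          le_trans (PySem.List.max?_isMax hmax y hy2) (by omega)⟩
      · omega
    · omega
  exact ⟨min?_eq_some_of _ _ hmmem (fun y hy => (hrange y hy).1),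
    max?_eq_some_of _ _ hMmem (fun y hy => (hrange y hy).2)⟩

theorem solveLoop_const (k : Nat) (arr : List Int) (m : Int)
    (hmin : PySem.List.min? arr (fun x => x) = some m)
    (hmax : PySem.List.max? arr (fun x => x) = some m) :
    solveLoop k arr = arr := by
  induction k with
  | zero => rfl
  | succ k ih =>
      show solveLoop k (solveStep arr) = arr
      rw [solveStep_const arr m hmin hmax, ih]

theorem solveLoop_spread (k : Nat) (arr : List Int) (m M : Int)
    (hmin : PySem.List.min? arr (fun x => x) = some m)
    (hmax : PySem.List.max? arr (fun x => x) = some M)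
    (hlt : m < M) :
    PySem.List.min? (solveLoop k arr) (fun x => x) = some (m - k) ∧
    PySem.List.max? (solveLoop k arr) (fun x => x) = some (M + k) := by
  induction k generalizing arr m M with
  | zero => simpa using ⟨hmin, hmax⟩
  | succ k ih =>
      obtain ⟨h1, h2⟩ := solveStep_spread arr m M hmin hmax hlt
      obtain ⟨h3, h4⟩ := ih (solveStep arr) (m - 1) (M + 1) h1 h2 (by omega)
      constructor
      · rw [show solveLoop (k + 1) arr = solveLoop k (solveStep arr) from rfl, h3]
        congr 1; push_cast; ring
      · rw [show solveLoop (k + 1) arr = solveLoop k (solveStep arr) from rfl, h4]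
        congr 1; push_cast; ring

-- ===== VERDICT (by name: the statement is the Claim_ definition above) =====
theorem solve_spec : Claim_equal_solve := by
  intro n arr _ hpre
  obtain ⟨hn, hne⟩ := hpre
  unfold Spec_solve solve solve_alt
  dsimp only
  cases hmin : PySem.List.min? arr (fun x => x) with
  | none => exact absurd ((PySem.List.min?_eq_none_iff arr _).mp hmin) hne
  | some m =>
  cases hmax : PySem.List.max? arr (fun x => x) with
  | none => exact absurd ((PySem.List.max?_eq_none_iff arr _).mp hmax) hne
  | some M =>
  have hle : m ≤ M := PySem.List.min?_isMin hmin M (PySem.List.max?_mem hmax)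
  rcases eq_or_lt_of_le hle with rfl | hlt
  · rw [solveLoop_const n.toNat arr m hmin hmax]
    simp [hmin, hmax]
  · obtain ⟨h1, h2⟩ := solveLoop_spread n.toNat arr m M hmin hmax hlt
    rw [h1, h2]
    simp only [Option.getD_some]
    have : ((n.toNat : Int)) = n := Int.toNat_of_nonneg hn
    have hne2 : (m == M) = false := by simp [ne_of_lt hlt]
    rw [hne2, if_neg Bool.false_ne_true]
    omega
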